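-- pv_equiv track=rewrite | github.com/andresmesad09/advent_of_code_2022 | code/challenge_8.py | check_side
-- ===== SOURCE A (Python) =====
-- def check_side(item, side_list):
--     is_visible_on_side = 0
--     for e in side_list:
--         if item > int(e):
--             is_visible_on_side += 1
--     if is_visible_on_side == len(side_list):
--         return True
--     return False
-- ===== SOURCE B (Python) =====
-- def check_side(item, side_list):
--     if not side_list:
--         return True
--     return item > max(int(e) for e in side_list)
-- ===== Notes on version B (the rewrite author's own statement) =====
-- stated objective: simpler
-- what changed: Replaces the counter-vs-length loop by an empty guard plus a single strict comparison against the maximum of the converted elements.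
import Mathlib
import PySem

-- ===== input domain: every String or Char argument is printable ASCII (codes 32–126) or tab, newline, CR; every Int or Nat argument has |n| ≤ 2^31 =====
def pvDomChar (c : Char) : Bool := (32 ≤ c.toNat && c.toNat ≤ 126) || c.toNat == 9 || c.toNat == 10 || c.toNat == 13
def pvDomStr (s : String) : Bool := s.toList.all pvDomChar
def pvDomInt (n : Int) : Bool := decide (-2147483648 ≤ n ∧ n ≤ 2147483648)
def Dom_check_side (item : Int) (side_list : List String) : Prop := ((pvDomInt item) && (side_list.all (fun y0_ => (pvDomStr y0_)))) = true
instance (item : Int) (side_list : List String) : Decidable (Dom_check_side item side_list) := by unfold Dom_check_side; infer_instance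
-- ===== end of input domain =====

-- B replaces A's counter-vs-length loop with an empty guard plus one strict comparison
-- against the running maximum of the converted elements (objective: simpler).


-- ===== PORT A =====
-- int(e) is PySem.Int.ofStr?; Pre_ excludes the ValueError case, so getD 0 is never taken.
def check_side (item : Int) (side_list : List String) : Bool :=
  let cnt : Int := side_list.foldl
    (fun acc e => if item > (PySem.Int.ofStr? e).getD 0 then acc + 1 else acc) 0
  if cnt = (side_list.length : Int) then true else false

-- ===== PORT B =====
-- 'max(int(e) for e in side_list)' as a running max over the parsed values.
def check_side_alt (item : Int) (side_list : List String) : Bool :=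
  match side_list with
  | [] => true
  | e :: rest =>
    decide (item > rest.foldl (fun m s => max m ((PySem.Int.ofStr? s).getD 0))
                              ((PySem.Int.ofStr? e).getD 0))

-- ===== PRECONDITION & SPEC =====
-- Pre_ excludes exactly the inputs where int(e) raises ValueError in A (and in B).
def Pre_check_side (item : Int) (side_list : List String) : Prop :=
  ∀ s ∈ side_list, (PySem.Int.ofStr? s).isSome
instance (item : Int) (side_list : List String) : Decidable (Pre_check_side item side_list) := by
  unfold Pre_check_side; infer_instance

def pvWitness_check_side : Int × List String := (5, ["1", "2"])

def Spec_check_side (item : Int) (side_list : List String) (out : Bool) : Prop := out = check_side_alt item side_list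
instance (item : Int) (side_list : List String) (out : Bool) : Decidable (Spec_check_side item side_list out) := by unfold Spec_check_side; infer_instance

-- ===== CLAIM (what is proved, stated in full; the proofs are below) =====
def Claim_equal_check_side : Prop := ∀ (item : Int) (side_list : List String), Dom_check_side item side_list → Pre_check_side item side_list → Spec_check_side item side_list (check_side item side_list)

-- ===== LEMMAS AND PROOFS =====

lemma cnt_foldl (item : Int) (l : List String) (c : Int) :
    l.foldl (fun acc e => if item > (PySem.Int.ofStr? e).getD 0 then acc + 1 else acc) c
      = c + (l.countP (fun e => decide (item > (PySem.Int.ofStr? e).getD 0)) : Int) := by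
  induction l generalizing c with
  | nil => simp
  | cons e rest ih =>
    simp only [List.foldl_cons, List.countP_cons, ih]
    by_cases h : item > (PySem.Int.ofStr? e).getD 0 <;> simp [h] <;> push_cast <;> ring

lemma check_side_eq_all (item : Int) (l : List String) :
    check_side item l = l.all (fun e => decide (item > (PySem.Int.ofStr? e).getD 0)) := by
  unfold check_side
  rw [cnt_foldl]
  simp only [zero_add]
  by_cases hc : l.countP (fun e => decide (item > (PySem.Int.ofStr? e).getD 0)) = l.length
  · have h2 : ((l.countP (fun e => decide (item > (PySem.Int.ofStr? e).getD 0)) : Int) = (l.length : Int)) := by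
      exact_mod_cast hc
    simp only [h2, if_true]
    exact (List.all_eq_true.mpr (fun a ha => List.countP_eq_length.mp hc a ha)).symm
  · have h2 : ¬ ((l.countP (fun e => decide (item > (PySem.Int.ofStr? e).getD 0)) : Int) = (l.length : Int)) := by
      exact_mod_cast hc
    simp only [h2, if_false]
    cases hb : l.all (fun e => decide (item > (PySem.Int.ofStr? e).getD 0)) with
    | false => rfl
    | true =>
      exact absurd (List.countP_eq_length.mpr (fun a ha => List.all_eq_true.mp hb a ha)) hc

lemma gt_foldl_max (item : Int) (l : List String) (a : Int) :
    (decide (item > l.foldl (fun m s => max m ((PySem.Int.ofStr? s).getD 0)) a))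
      = ((decide (item > a)) && l.all (fun e => decide (item > (PySem.Int.ofStr? e).getD 0))) := by
  induction l generalizing a with
  | nil => simp
  | cons e rest ih =>
    rw [List.foldl_cons, ih (max a ((PySem.Int.ofStr? e).getD 0)), List.all_cons]
    by_cases h1 : item > a <;> by_cases h2 : item > (PySem.Int.ofStr? e).getD 0 <;>
      simp [h1, h2, max_lt_iff] <;> omega

lemma check_side_alt_eq_all (item : Int) (l : List String) :
    check_side_alt item l = l.all (fun e => decide (item > (PySem.Int.ofStr? e).getD 0)) := by
  cases l with
  | nil => rfl
  | cons e rest =>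
    show (decide (item > rest.foldl (fun m s => max m ((PySem.Int.ofStr? s).getD 0)) ((PySem.Int.ofStr? e).getD 0))) = _
    rw [gt_foldl_max, List.all_cons]

-- ===== VERDICT (by name: the statement is the Claim_ definition above) =====
theorem check_side_spec : Claim_equal_check_side := by
  intro item side_list _ _
  unfold Spec_check_side
  rw [check_side_eq_all, check_side_alt_eq_all]
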